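-- pv_equiv track=rewrite | github.com/digitalsleuth/icq-parser | icq_parser/icq_parser.py | convert_to_mask
-- ===== SOURCE A (Python) =====
-- def convert_to_mask(text):
--     """ Converts text to a * masked string, for log file comparison """
--     result = []
--     i = 0
--     while i < len(text):
--         char = text[i]
--         # This covers literal \n characters in the text
--         if i < len(text) - 1 and char == '\\' and text[i + 1] == 'n':
--             result.append('**')
--             i += 2
--         # This covers the single newline character in the text
--         elif char == "\n":
--             result.append('**')
--             i += 1
--         elif char == ' ':
--             result.append(' ')
--             i += 1
--         # This covers emoji in the text.
--         else:
--             byte_length = len(char.encode('utf-8'))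
--             result.append('*' * byte_length)
--             i += 1
--     return ''.join(result)
-- ===== SOURCE B (Python) =====
-- def convert_to_mask(text):
--     """ Converts text to a * masked string, for log file comparison """
--     def mask(ch):
--         if ch == '\n':
--             return '**'
--         if ch == ' ':
--             return ' '
--         return '*' * len(ch.encode('utf-8'))
--     return ''.join(mask(ch) for ch in text.replace('\\n', '\n'))
-- ===== Notes on version B (the rewrite author's own statement) =====
-- stated objective: idiomatic
-- what changed: Replaces the manual index/lookahead while-loop with a two-phase pipeline: str.replace collapses literal backslash-n into a real newline first, then a per-character mask is joined, eliminating the index bookkeeping and the lookahead branch.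
import Mathlib
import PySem

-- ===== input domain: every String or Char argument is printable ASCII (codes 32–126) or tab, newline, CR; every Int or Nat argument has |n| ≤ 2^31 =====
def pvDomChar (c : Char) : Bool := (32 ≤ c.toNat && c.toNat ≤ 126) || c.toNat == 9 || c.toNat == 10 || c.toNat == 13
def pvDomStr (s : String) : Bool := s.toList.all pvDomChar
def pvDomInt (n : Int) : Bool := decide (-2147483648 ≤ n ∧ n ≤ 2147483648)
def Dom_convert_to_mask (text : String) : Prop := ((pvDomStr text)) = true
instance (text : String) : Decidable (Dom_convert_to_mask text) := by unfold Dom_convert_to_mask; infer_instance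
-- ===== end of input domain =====

-- B replaces A's manual index/lookahead while-loop with str.replace (literal backslash-n → newline) followed by a per-character mask; idiomatic, same cost.

-- ===== PORT A =====
-- A's while-loop over index i, as recursion on the remaining characters; the if/elif chain
-- is kept in order ('\'+'n' lookahead, then '\n', then ' ', then byte-length stars).
def convertA_go (l : List Char) : List (List Char) :=
  match l with
  | [] => []
  | c :: rest =>
    if c = '\\' ∧ rest.head? = some 'n' then ['*', '*'] :: convertA_go rest.tail
    else if c = '\n' then ['*', '*'] :: convertA_go rest
    else if c = ' ' then [' '] :: convertA_go rest
    else (List.replicate c.utf8Size '*') :: convertA_go rest   -- len(char.encode('utf-8'))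
termination_by l.length
decreasing_by
  all_goals cases rest <;> simp

def convert_to_mask (text : String) : String :=
  String.ofList (PySem.Chars.join [] (convertA_go text.toList))   -- ''.join(result)

-- ===== PORT B =====
def maskB (c : Char) : List Char :=
  if c = '\n' then ['*', '*']
  else if c = ' ' then [' ']
  else List.replicate c.utf8Size '*'

def convert_to_mask_alt (text : String) : String :=
  String.ofList (((PySem.Str.replace text "\\n" "\n").toList).flatMap maskB)

-- ===== PRECONDITION & SPEC =====
def Spec_convert_to_mask (text : String) (out : String) : Prop := out = convert_to_mask_alt text
instance (text : String) (out : String) : Decidable (Spec_convert_to_mask text out) := by unfold Spec_convert_to_mask; infer_instance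

-- ===== CLAIM (what is proved, stated in full; the proofs are below) =====
def Claim_equal_convert_to_mask : Prop := ∀ (text : String), Dom_convert_to_mask text → Spec_convert_to_mask text (convert_to_mask text)

-- ===== LEMMAS AND PROOFS =====

-- the result of text.replace('\\n','\n'), as a simple structural recursion
def repNl (l : List Char) : List Char :=
  match l with
  | [] => []
  | c :: rest =>
    if c = '\\' ∧ rest.head? = some 'n' then '\n' :: repNl rest.tail
    else c :: repNl rest
termination_by l.length
decreasing_by
  all_goals cases rest <;> simp

theorem replace_go_eq (fuel : Nat) (l acc : List Char) (h : l.length ≤ fuel) :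
    PySem.Chars.replace.go ['\\', 'n'] ['\n'] fuel l acc = acc.reverse ++ repNl l := by
  induction fuel generalizing l acc with
  | zero =>
    rw [PySem.Chars.replace.go.eq_def]
    cases l with
    | nil => simp [repNl]
    | cons c t => simp at h
  | succ fuel ih =>
    rw [PySem.Chars.replace.go.eq_def]
    match l, h with
    | [], _ => simp [repNl]
    | [c], h =>
      have hp : ¬ (List.isPrefixOf ['\\', 'n'] [c] = true) := by
        simp [List.isPrefixOf]
      simp only [hp]
      rw [ih [] (c :: acc) (by simp)]
      simp [repNl]
    | c :: d :: t, h =>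
      by_cases hcd : c = '\\' ∧ d = 'n'
      · obtain ⟨rfl, rfl⟩ := hcd
        have hp : List.isPrefixOf ['\\', 'n'] ('\\' :: 'n' :: t) = true := by
          simp [List.isPrefixOf]
        simp only [hp, if_true]
        rw [show List.drop (['\\', 'n'] : List Char).length ('\\' :: 'n' :: t) = t from rfl]
        rw [ih t _ (by simp at h ⊢; omega)]
        conv_rhs => rw [repNl]
        simp
      · have hp : ¬ (List.isPrefixOf ['\\', 'n'] (c :: d :: t) = true) := by
          simp [List.isPrefixOf]; tauto
        simp only [hp]
        rw [ih (d :: t) (c :: acc) (by simp at h ⊢; omega)]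
        conv_rhs => rw [repNl]
        have hne : ¬(c = '\\' ∧ (d :: t).head? = some 'n') := by
          rintro ⟨rfl, hd⟩
          simp at hd
          exact hcd ⟨rfl, hd⟩
        rw [if_neg hne]
        simp

theorem replace_eq_repNl (l : List Char) :
    PySem.Chars.replace l ['\\', 'n'] ['\n'] = repNl l := by
  rw [PySem.Chars.replace]
  simp only [List.isEmpty]
  exact replace_go_eq l.length l [] (le_refl _)

theorem join_nil_flatten (l : List (List Char)) :
    PySem.Chars.join [] l = l.flatten := by
  induction l with
  | nil => simp [PySem.Chars.join, List.intercalate]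
  | cons a t ih =>
    cases t with
    | nil => simp [PySem.Chars.join, List.intercalate]
    | cons b u =>
      simp only [PySem.Chars.join, List.intercalate] at *
      simp [List.intersperse] at *
      simpa using ih

theorem convertA_flatten (l : List Char) :
    (convertA_go l).flatten = (repNl l).flatMap maskB := by
  induction l using convertA_go.induct with
  | case1 => rw [convertA_go, repNl]; simp
  | case2 c rest hc ih =>
    rw [convertA_go, repNl]
    simp only [if_pos hc]
    simp [maskB, ih]
  | case3 rest hc ih =>
    rw [convertA_go, repNl]
    simp only [if_neg hc]
    simp [maskB, ih]
  | case4 rest hc hn ih =>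
    rw [convertA_go, repNl]
    simp only [if_neg hc, if_neg hn]
    simp [maskB, ih]
  | case5 c rest hc hn hs ih =>
    rw [convertA_go, repNl]
    simp only [if_neg hc, if_neg hn, if_neg hs]
    simp only [List.flatten_cons, List.flatMap_cons, ih]
    have hm : maskB c = List.replicate c.utf8Size '*' := by
      unfold maskB; rw [if_neg hn, if_neg hs]
    rw [hm]

-- ===== VERDICT (by name: the statement is the Claim_ definition above) =====
theorem convert_to_mask_spec : Claim_equal_convert_to_mask := by
  intro text _
  unfold Spec_convert_to_mask convert_to_mask convert_to_mask_alt
  rw [PySem.Str.toList_replace]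
  rw [join_nil_flatten, convertA_flatten]
  have h1 : "\\n".toList = ['\\', 'n'] := by decide
  have h2 : "\n".toList = ['\n'] := by decide
  rw [h1, h2, replace_eq_repNl]
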